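-- pv_equiv track=rewrite | github.com/SarjakNEPAL/College | Semester 1/Programming and algorithms/Function/1st class/Practice Questions/Q11.py | nl
-- ===== SOURCE A (Python) =====
-- def nl(a):
--     temp=[]
--     for i in range(0,len(a)):
--         r=a[1]
--         if i==1:temp.append("a")
--         elif i==2:temp.append(r)
--         else: temp.append(a[i])
--     return temp
-- ===== SOURCE B (Python) =====
-- def nl(a):
--     if not a:
--         return []
--     r = a[1]
--     temp = list(a)
--     temp[1] = "a"
--     if len(a) > 2:
--         temp[2] = r
--     return temp
-- ===== Notes on version B (the rewrite author's own statement) =====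
-- stated objective: simpler
-- what changed: Replaces the element-by-element loop with per-index branches by one bulk copy of the list plus two positional overwrites (index 1 set to "a", index 2 set to the pre-read a[1] when it exists).
import Mathlib
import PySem

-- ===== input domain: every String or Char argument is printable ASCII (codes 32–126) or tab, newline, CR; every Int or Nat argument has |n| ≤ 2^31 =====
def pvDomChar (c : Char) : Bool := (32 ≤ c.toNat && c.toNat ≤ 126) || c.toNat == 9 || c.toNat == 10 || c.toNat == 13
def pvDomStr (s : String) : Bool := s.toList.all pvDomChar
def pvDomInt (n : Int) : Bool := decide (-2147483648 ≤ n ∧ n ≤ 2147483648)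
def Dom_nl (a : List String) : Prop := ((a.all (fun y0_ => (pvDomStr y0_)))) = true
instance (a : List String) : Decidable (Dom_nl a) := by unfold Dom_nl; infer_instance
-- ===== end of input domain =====

-- B replaces the per-index loop by one bulk copy plus two positional overwrites (simpler decomposition).
-- ===== PORT A =====
def nl (a : List String) : List String :=
  (PySem.List.pyRange 0 (a.length : Int) 1).foldl
    (fun temp i =>
      let r := PySem.List.pyGetD a 1 ""          -- a[1]; in range under Pre_ whenever the loop runs
      if i == 1 then temp ++ ["a"]
      else if i == 2 then temp ++ [r]
      else temp ++ [PySem.List.pyGetD a i ""])   -- a[i]; always in range for i in range(len(a))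
    []

-- ===== PORT B =====
def nl_alt (a : List String) : List String :=
  if a = [] then []
  else
    let r := PySem.List.pyGetD a 1 ""            -- a[1]; in range under Pre_ when a ≠ []
    let temp := PySem.List.pySetD a 1 "a"        -- temp = list(a); temp[1] = "a"
    if 2 < a.length then PySem.List.pySetD temp 2 r else temp

-- ===== PRECONDITION & SPEC =====
-- Pre_ excludes exactly the singleton lists, on which both A and B raise IndexError reading a[1].
def Pre_nl (a : List String) : Prop := a.length ≠ 1
instance (a : List String) : Decidable (Pre_nl a) := by unfold Pre_nl; infer_instance
def pvWitness_nl : List String := (["x", "y", "z"])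
def Spec_nl (a : List String) (out : List String) : Prop := out = nl_alt a
instance (a : List String) (out : List String) : Decidable (Spec_nl a out) := by unfold Spec_nl; infer_instance

-- ===== CLAIM (what is proved, stated in full; the proofs are below) =====
def Claim_equal_nl : Prop := ∀ (a : List String), Dom_nl a → Pre_nl a → Spec_nl a (nl a)

-- ===== LEMMAS AND PROOFS =====
theorem nl_eq_map (a : List String) :
    nl a = (List.range a.length).map
      (fun (k : Nat) => if k = 1 then "a"
                else if k = 2 then PySem.List.pyGetD a 1 ""
                else PySem.List.pyGetD a (k : Int) "") := by
  unfold nl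
  have hb : (fun (temp : List String) (i : Int) =>
      let r := PySem.List.pyGetD a 1 ""
      if i == 1 then temp ++ ["a"]
      else if i == 2 then temp ++ [r]
      else temp ++ [PySem.List.pyGetD a i ""]) =
      (fun temp i => temp ++ [if i == 1 then "a"
        else if i == 2 then PySem.List.pyGetD a 1 ""
        else PySem.List.pyGetD a i ""]) := by
    funext temp i
    by_cases h1 : i == 1 <;> by_cases h2 : i == 2 <;> simp [h1, h2]
  rw [hb, PySem.List.foldl_append_singleton_eq_map, PySem.List.pyRange_one]
  simp only [List.nil_append, List.map_map]
  apply List.map_congr_left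
  intro k _
  simp [Function.comp]
  by_cases h2 : k = 2
  · simp [h2]
  · simp [h2]
    rw [if_neg (by omega : ¬((k : Int) = 2))]

-- ===== VERDICT (by name: the statement is the Claim_ definition above) =====
theorem nl_spec : Claim_equal_nl := by
  intro a _ hpre
  unfold Spec_nl nl_alt
  rw [nl_eq_map]
  match a, hpre with
  | [], _ => simp
  | x :: y :: rest, _ =>
    rw [if_neg (by simp)]
    have hlen1 : 1 < (x :: y :: rest).length := by simp
    have hget1 : PySem.List.pyGetD (x :: y :: rest) 1 "" = y := by
      simp [PySem.List.pyGetD, PySem.List.pyIdx?, PySem.List.pyGet?]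
    show _ = (if 2 < (x :: y :: rest).length
        then PySem.List.pySetD (PySem.List.pySetD (x :: y :: rest) 1 "a") 2
          (PySem.List.pyGetD (x :: y :: rest) 1 "")
        else PySem.List.pySetD (x :: y :: rest) 1 "a")
    rw [PySem.List.pySetD_of_nonneg _ _ (by norm_num)]
    by_cases h3 : 2 < (x :: y :: rest).length
    · rw [if_pos h3, PySem.List.pySetD_of_nonneg _ _ (by norm_num)]
      apply List.ext_getElem
      · simp
      · intro i hi1 hi2
        simp only [List.getElem_map, List.getElem_range, List.getElem_set]
        have hi : i < (x :: y :: rest).length := by simpa using hi1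
        by_cases e1 : i = 1
        · simp [e1]
        · by_cases e2 : i = 2
          · simp [e2, hget1]
          · have e1' : ¬(1 = i) := fun h => e1 h.symm
            have e2' : ¬(2 = i) := fun h => e2 h.symm
            simp [e1, e2, e1', e2', List.getElem?_eq_getElem hi]
    · rw [if_neg h3]
      have hr : rest = [] := by
        simp only [List.length_cons] at h3
        exact List.length_eq_zero_iff.mp (by omega)
      subst hr
      simp [List.range_succ, PySem.List.pySetD, PySem.List.pySet?, PySem.List.pyIdx?]
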